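-- pv_equiv track=rewrite | github.com/MSFT-Codeforces/Junk_beacon_rank_ledger | misc/test_case_validator.py | parse_one_case
-- ===== SOURCE A (Python) =====
-- class DSU:
--     __slots__ = ("p", "sz", "cc")
--     def __init__(self, n: int):
--         self.p = list(range(n))
--         self.sz = [1] * n
--         self.cc = n
--
--     def find(self, a: int) -> int:
--         p = self.p
--         while p[a] != a:
--             p[a] = p[p[a]]
--             a = p[a]
--         return a
--
--     def union(self, a: int, b: int) -> None:
--         ra = self.find(a)
--         rb = self.find(b)
--         if ra == rb:
--             return
--         if self.sz[ra] < self.sz[rb]: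
--             ra, rb = rb, ra
--         self.p[rb] = ra
--         self.sz[ra] += self.sz[rb]
--         self.cc -= 1
--
-- def parse_one_case(lines, idx):
--     # returns (ok, new_idx)
--     if idx >= len(lines):
--         return (False, idx)
--
--     parts = lines[idx].split(" ")
--     if len(parts) != 2:
--         return (False, idx)
--     try:
--         n = int(parts[0]); m = int(parts[1])
--     except:
--         return (False, idx)
--
--     # constraints
--     if not (2 <= n <= 2 * 10**5):
--         return (False, idx)
--     if not (n - 1 <= m <= 2 * 10**5):
--         return (False, idx)
--
--     # Need lines idx+1 ... idx+m
--     if idx + m >= len(lines):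
--         return (False, idx)
--
--     dsu = DSU(n)
--
--     for j in range(1, m + 1):
--         parts = lines[idx + j].split(" ")
--         if len(parts) != 3:
--             return (False, idx)
--         try:
--             u = int(parts[0]); v = int(parts[1]); w = int(parts[2])
--         except:
--             return (False, idx)
--
--         if not (1 <= u <= n and 1 <= v <= n):
--             return (False, idx)
--         if not (-10**9 <= w <= 10**9):
--             return (False, idx)
--
--         # connectedness considers undirected adjacency; self-loops don't help but are allowed.
--         if u != v:
--             dsu.union(u - 1, v - 1)
--
--     # graph must be connected (undirected)
--     if dsu.cc != 1:
--         return (False, idx)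
--
--     return (True, idx + 1 + m)
-- ===== SOURCE B (Python) =====
-- def parse_one_case(lines, idx):
--     # returns (ok, new_idx)
--     if idx >= len(lines):
--         return (False, idx)
--
--     parts = lines[idx].split(" ")
--     if len(parts) != 2:
--         return (False, idx)
--     try:
--         n = int(parts[0]); m = int(parts[1])
--     except:
--         return (False, idx)
--
--     if not (2 <= n <= 2 * 10**5):
--         return (False, idx)
--     if not (n - 1 <= m <= 2 * 10**5):
--         return (False, idx)
--
--     if idx + m >= len(lines):
--         return (False, idx)
--
--     adj = [[] for _ in range(n)]
--
--     for j in range(1, m + 1):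
--         parts = lines[idx + j].split(" ")
--         if len(parts) != 3:
--             return (False, idx)
--         try:
--             u = int(parts[0]); v = int(parts[1]); w = int(parts[2])
--         except:
--             return (False, idx)
--
--         if not (1 <= u <= n and 1 <= v <= n):
--             return (False, idx)
--         if not (-10**9 <= w <= 10**9):
--             return (False, idx)
--
--         if u != v:
--             adj[u - 1].append(v - 1)
--             adj[v - 1].append(u - 1)
--
--     # connectivity via iterative DFS from node 0
--     visited = [False] * n
--     visited[0] = True
--     count = 1
--     stack = [0]
--     while stack:
--         u = stack.pop()
--         for v in adj[u]:
--             if not visited[v]: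
--                 visited[v] = True
--                 count += 1
--                 stack.append(v)
--
--     if count != n:
--         return (False, idx)
--
--     return (True, idx + 1 + m)
-- ===== Notes on version B (the rewrite author's own statement) =====
-- stated objective: alternative
-- what changed: The connectivity check is re-implemented: instead of a union-find (DSU with path compression and union by size) counting components, B builds an undirected adjacency list while validating the edges and then runs an iterative stack-based DFS from node 0, counting reachable nodes; header parsing and per-edge validation are unchanged.
import Mathlib
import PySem

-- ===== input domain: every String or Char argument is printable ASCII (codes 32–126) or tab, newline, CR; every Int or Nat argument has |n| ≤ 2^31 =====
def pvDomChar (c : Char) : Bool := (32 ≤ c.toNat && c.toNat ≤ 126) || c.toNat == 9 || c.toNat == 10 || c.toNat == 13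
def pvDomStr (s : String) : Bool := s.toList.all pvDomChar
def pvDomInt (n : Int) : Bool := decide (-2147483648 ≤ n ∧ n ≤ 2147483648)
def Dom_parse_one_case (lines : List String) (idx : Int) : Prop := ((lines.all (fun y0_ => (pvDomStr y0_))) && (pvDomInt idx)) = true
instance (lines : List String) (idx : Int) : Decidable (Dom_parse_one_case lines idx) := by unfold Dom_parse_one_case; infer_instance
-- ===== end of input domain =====

-- B replaces A's union-find (DSU with path compression and union by size) by an undirected
-- adjacency list plus an iterative DFS from node 0 that counts reachable nodes (alternative
-- data structure / algorithm for the connectivity check; header parsing and per-edge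
-- validation are the same).

-- ===== PORT A =====
-- DSU.find: the indices stored in p are the nonnegative ints 0..n-1, so they are kept as Nat
-- and indexing uses List.getD (Python indexes in range on every state A reaches); the fuel
-- argument only makes the while-loop total (Python's loop terminates on reachable states).
def pvFind : Nat → List Nat → Nat → List Nat × Nat
  | 0, p, a => (p, a)
  | fuel + 1, p, a =>
    let pa := p.getD a 0
    if pa = a then (p, a)
    else
      let na := p.getD pa 0        -- p[a] = p[p[a]]; a = p[a]
      pvFind fuel (p.set a na) na

def pvUnion (p sz : List Nat) (cc : Int) (a b : Nat) : List Nat × List Nat × Int :=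
  let fa := pvFind p.length p a
  let fb := pvFind fa.1.length fa.1 b
  let p2 := fb.1
  let ra := fa.2
  let rb := fb.2
  if ra = rb then (p2, sz, cc)
  else
    let rab := if sz.getD ra 0 < sz.getD rb 0 then (rb, ra) else (ra, rb)
    (p2.set rab.2 rab.1, sz.set rab.1 (sz.getD rab.1 0 + sz.getD rab.2 0), cc - 1)

-- the for-loop over j = 1..m: validates line idx+j and unions the edge; none = early (False, idx)
def pvALoop (lines : List String) (idx n : Int) :
    Nat → Nat → List Nat × List Nat × Int → Option (List Nat × List Nat × Int)
  | _, 0, st => some st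
  | j, k + 1, st =>
    let parts := (PySem.Str.split? (PySem.List.pyGetD lines (idx + (j : Int)) "") " ").getD []
    if parts.length ≠ 3 then none
    else
      match PySem.Int.ofStr? (parts.getD 0 ""), PySem.Int.ofStr? (parts.getD 1 ""),
            PySem.Int.ofStr? (parts.getD 2 "") with
      | some u, some v, some w =>
        if ¬ (1 ≤ u ∧ u ≤ n ∧ 1 ≤ v ∧ v ≤ n) then none
        else if ¬ (-1000000000 ≤ w ∧ w ≤ 1000000000) then none
        else
          let st' := if u ≠ v then pvUnion st.1 st.2.1 st.2.2 (u - 1).toNat (v - 1).toNat else st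
          pvALoop lines idx n (j + 1) k st'
      | _, _, _ => none

def parse_one_case (lines : List String) (idx : Int) : Bool × Int :=
  if (lines.length : Int) ≤ idx then (false, idx)
  else
    let parts := (PySem.Str.split? (PySem.List.pyGetD lines idx "") " ").getD []
    if parts.length ≠ 2 then (false, idx)
    else
      match PySem.Int.ofStr? (parts.getD 0 ""), PySem.Int.ofStr? (parts.getD 1 "") with
      | some n, some m =>
        if ¬ (2 ≤ n ∧ n ≤ 200000) then (false, idx)
        else if ¬ (n - 1 ≤ m ∧ m ≤ 200000) then (false, idx)
        else if (lines.length : Int) ≤ idx + m then (false, idx)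
        else
          match pvALoop lines idx n 1 m.toNat
              (List.range n.toNat, List.replicate n.toNat 1, n) with
          | none => (false, idx)
          | some st => if st.2.2 ≠ 1 then (false, idx) else (true, idx + 1 + m)
      | _, _ => (false, idx)

-- ===== PORT B =====
-- push every unvisited neighbour (for v in adj[u]: …); the bound check v < vis.length only
-- makes the function total (Python's visited[v] is in range on every state B reaches)
def pvNeighbors : List Bool → Int → List Nat → List Nat → List Bool × Int × List Nat
  | vis, cnt, stk, [] => (vis, cnt, stk)
  | vis, cnt, stk, v :: vs =>
    if v < vis.length ∧ vis.getD v false = false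
    then pvNeighbors (vis.set v true) (cnt + 1) (v :: stk) vs
    else pvNeighbors vis cnt stk vs

-- termination helpers for the DFS while-loop (cited by decreasing_by below)
theorem pvCountP_set_lt (l : List Bool) (v : Nat) (hv : v < l.length)
    (hf : l.getD v false = false) :
    (l.set v true).countP (fun b => b = false) < l.countP (fun b => b = false) := by
  induction l generalizing v with
  | nil => simp at hv
  | cons a l ih =>
    cases v with
    | zero => simp_all
    | succ v =>
      simp only [List.set]
      simp only [List.length_cons, Nat.succ_lt_succ_iff] at hv
      have := ih v hv (by simpa [List.getD] using hf)
      simp only [List.countP_cons]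
      omega

theorem pvNeighbors_measure (ns : List Nat) (vis : List Bool) (cnt : Int) (stk : List Nat) :
    ((pvNeighbors vis cnt stk ns).1 = vis ∧ (pvNeighbors vis cnt stk ns).2.2 = stk) ∨
    (pvNeighbors vis cnt stk ns).1.countP (fun b => b = false) <
      vis.countP (fun b => b = false) := by
  induction ns generalizing vis cnt stk with
  | nil => simp [pvNeighbors]
  | cons v vs ih =>
    by_cases h : v < vis.length ∧ vis.getD v false = false
    · simp only [pvNeighbors, if_pos h]
      right
      rcases ih (vis.set v true) (cnt + 1) (v :: stk) with ⟨h1, _⟩ | h1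
      · rw [h1]; exact pvCountP_set_lt vis v h.1 h.2
      · exact lt_trans h1 (pvCountP_set_lt vis v h.1 h.2)
    · simp only [pvNeighbors, if_neg h]
      exact ih vis cnt stk

-- the while-stack loop: pop u, push unvisited neighbours
def pvDfsLoop (adj : List (List Nat)) (vis : List Bool) (cnt : Int) (stk : List Nat) :
    List Bool × Int :=
  match stk with
  | [] => (vis, cnt)
  | u :: rest =>
    let s := pvNeighbors vis cnt rest (adj.getD u [])
    pvDfsLoop adj s.1 s.2.1 s.2.2
termination_by (vis.countP (fun b => b = false), stk.length)
decreasing_by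
  rcases pvNeighbors_measure (adj.getD u []) vis cnt rest with ⟨h1, h2⟩ | h1
  · rw [h1, h2]; right; simp
  · left; exact h1

-- the for-loop over j = 1..m: same validation, but builds the undirected adjacency list
def pvBLoop (lines : List String) (idx n : Int) :
    Nat → Nat → List (List Nat) → Option (List (List Nat))
  | _, 0, adj => some adj
  | j, k + 1, adj =>
    let parts := (PySem.Str.split? (PySem.List.pyGetD lines (idx + (j : Int)) "") " ").getD []
    if parts.length ≠ 3 then none
    else
      match PySem.Int.ofStr? (parts.getD 0 ""), PySem.Int.ofStr? (parts.getD 1 ""),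
            PySem.Int.ofStr? (parts.getD 2 "") with
      | some u, some v, some w =>
        if ¬ (1 ≤ u ∧ u ≤ n ∧ 1 ≤ v ∧ v ≤ n) then none
        else if ¬ (-1000000000 ≤ w ∧ w ≤ 1000000000) then none
        else
          let adj' :=
            if u ≠ v then
              let a1 := adj.set (u - 1).toNat (adj.getD (u - 1).toNat [] ++ [(v - 1).toNat])
              a1.set (v - 1).toNat (a1.getD (v - 1).toNat [] ++ [(u - 1).toNat])
            else adj
          pvBLoop lines idx n (j + 1) k adj'
      | _, _, _ => none

def parse_one_case_alt (lines : List String) (idx : Int) : Bool × Int :=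
  if (lines.length : Int) ≤ idx then (false, idx)
  else
    let parts := (PySem.Str.split? (PySem.List.pyGetD lines idx "") " ").getD []
    if parts.length ≠ 2 then (false, idx)
    else
      match PySem.Int.ofStr? (parts.getD 0 ""), PySem.Int.ofStr? (parts.getD 1 "") with
      | some n, some m =>
        if ¬ (2 ≤ n ∧ n ≤ 200000) then (false, idx)
        else if ¬ (n - 1 ≤ m ∧ m ≤ 200000) then (false, idx)
        else if (lines.length : Int) ≤ idx + m then (false, idx)
        else
          match pvBLoop lines idx n 1 m.toNat (List.replicate n.toNat []) with
          | none => (false, idx)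
          | some adj =>
            let r := pvDfsLoop adj ((List.replicate n.toNat false).set 0 true) 1 [0]
            if r.2 ≠ n then (false, idx) else (true, idx + 1 + m)
      | _, _ => (false, idx)

-- ===== PRECONDITION & SPEC =====
-- Pre_ excludes only the inputs where Python A raises IndexError: a negative idx below
-- -len(lines) (Python's negative indexing makes lines[idx] raise exactly there).
def Pre_parse_one_case (lines : List String) (idx : Int) : Prop :=
  -(lines.length : Int) ≤ idx
instance (lines : List String) (idx : Int) : Decidable (Pre_parse_one_case lines idx) := by
  unfold Pre_parse_one_case; infer_instance

def pvWitness_parse_one_case : List String × Int := (["2 1", "1 2 0"], 0)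

def Spec_parse_one_case (lines : List String) (idx : Int) (out : Bool × Int) : Prop :=
  out = parse_one_case_alt lines idx
instance (lines : List String) (idx : Int) (out : Bool × Int) :
    Decidable (Spec_parse_one_case lines idx out) := by unfold Spec_parse_one_case; infer_instance

-- ===== CLAIM (what is proved, stated in full; the proofs are below) =====
def Claim_equal_parse_one_case : Prop :=
  ∀ (lines : List String) (idx : Int), Dom_parse_one_case lines idx →
    Pre_parse_one_case lines idx → Spec_parse_one_case lines idx (parse_one_case lines idx)

-- ===== LEMMAS AND PROOFS =====


-- spec layer: the undirected reachability generated by the processed (0-based) edge list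
def pvAdjacent (E : List (Nat × Nat)) (x y : Nat) : Prop := (x, y) ∈ E ∨ (y, x) ∈ E

def pvReach (E : List (Nat × Nat)) : Nat → Nat → Prop := Relation.ReflTransGen (pvAdjacent E)

def pvEGood (n : Nat) (E : List (Nat × Nat)) : Prop := ∀ e ∈ E, e.1 < n ∧ e.2 < n ∧ e.1 ≠ e.2

-- the root of a node in the DSU parent forest
inductive pvRootOf (p : List Nat) : Nat → Nat → Prop
  | self (a : Nat) : p.getD a 0 = a → pvRootOf p a a
  | step (a r : Nat) : p.getD a 0 ≠ a → pvRootOf p (p.getD a 0) r → pvRootOf p a r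

def pvREq (p : List Nat) (x y : Nat) : Prop := ∃ r, pvRootOf p x r ∧ pvRootOf p y r

structure pvInv (n : Nat) (p sz : List Nat) : Prop where
  plen : p.length = n
  szlen : sz.length = n
  bound : ∀ a, a < n → p.getD a 0 < n
  pos : ∀ a, a < n → 0 < sz.getD a 0
  inc : ∀ a, a < n → p.getD a 0 ≠ a → sz.getD a 0 < sz.getD (p.getD a 0) 0

def pvMu (n : Nat) (sz : List Nat) (a : Nat) : Nat :=
  ((Finset.range n).filter (fun b => sz.getD a 0 < sz.getD b 0)).card

def pvDSUGood (n : Nat) (p sz : List Nat) (cc : Int) (E : List (Nat × Nat)) : Prop :=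
  pvInv n p sz ∧
  cc = (((Finset.range n).filter (fun a => p.getD a 0 = a)).card : Int) ∧
  ∀ x y, x < n → y < n → (pvREq p x y ↔ pvReach E x y)

def pvAdjGood (n : Nat) (adj : List (List Nat)) (E : List (Nat × Nat)) : Prop :=
  adj.length = n ∧ ∀ x y, x < n → (y ∈ adj.getD x [] ↔ pvAdjacent E x y)

theorem pvRootOf_isRoot {p : List Nat} {a r : Nat} (h : pvRootOf p a r) : p.getD r 0 = r := by
  induction h with
  | self a h => exact h
  | step a r h hr ih => exact ih

theorem pvRootOf_unique {p : List Nat} {a r r' : Nat} (h : pvRootOf p a r)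
    (h' : pvRootOf p a r') : r = r' := by
  induction h with
  | self a h => cases h' with
    | self => rfl
    | step _ _ hne => exact absurd h hne
  | step a r h hr ih => cases h' with
    | self _ hroot => exact absurd hroot h
    | step _ _ _ hr' => exact ih hr'

theorem pvRootOf_lt {n : Nat} {p sz : List Nat} (inv : pvInv n p sz) {a r : Nat}
    (ha : a < n) (h : pvRootOf p a r) : r < n := by
  induction h with
  | self a h => exact ha
  | step a r h hr ih => exact ih (inv.bound a ha)

theorem pvMu_lt {n : Nat} {sz : List Nat} {a b : Nat} (hb : b < n)
    (hab : sz.getD a 0 < sz.getD b 0) : pvMu n sz b < pvMu n sz a := by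
  unfold pvMu
  apply Finset.card_lt_card
  constructor
  · intro c hc
    simp only [Finset.mem_filter, Finset.mem_range] at *
    exact ⟨hc.1, lt_trans hab hc.2⟩
  · intro hsub
    have hbm : b ∈ (Finset.range n).filter (fun c => sz.getD a 0 < sz.getD c 0) :=
      Finset.mem_filter.mpr ⟨Finset.mem_range.mpr hb, hab⟩
    have := Finset.mem_filter.mp (hsub hbm)
    omega

theorem pvRootOf_exists {n : Nat} {p sz : List Nat} (inv : pvInv n p sz) :
    ∀ a, a < n → ∃ r, pvRootOf p a r := by
  intro a ha
  induction hmu : pvMu n sz a using Nat.strong_induction_on generalizing a with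
  | _ mu ih =>
    by_cases h : p.getD a 0 = a
    · exact ⟨a, pvRootOf.self a h⟩
    · have hlt : pvMu n sz (p.getD a 0) < mu := by
        rw [← hmu]
        exact pvMu_lt (inv.bound a ha) (inv.inc a ha h)
      obtain ⟨r, hr⟩ := ih _ hlt (p.getD a 0) (inv.bound a ha) rfl
      exact ⟨r, pvRootOf.step a r h hr⟩

theorem pvGetD_set_ne {α : Type} (l : List α) (a x : Nat) (v d : α) (h : x ≠ a) :
    (l.set a v).getD x d = l.getD x d := by
  simp [List.getD, List.getElem?_set_ne (Ne.symm h)]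

theorem pvGetD_set_self {α : Type} (l : List α) (a : Nat) (v d : α) (h : a < l.length) :
    (l.set a v).getD a d = v := by
  simp [List.getD, h]

theorem pvGrand {n : Nat} {p sz : List Nat} (inv : pvInv n p sz) {a : Nat} (ha : a < n)
    (h : p.getD a 0 ≠ a) :
    sz.getD a 0 < sz.getD (p.getD (p.getD a 0) 0) 0 ∧ p.getD (p.getD a 0) 0 < n := by
  have hpa : p.getD a 0 < n := inv.bound a ha
  by_cases hroot : p.getD (p.getD a 0) 0 = p.getD a 0
  · rw [hroot]; exact ⟨inv.inc a ha h, hpa⟩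
  · exact ⟨lt_trans (inv.inc a ha h) (inv.inc _ hpa hroot), inv.bound _ hpa⟩

theorem pvGrand_ne {n : Nat} {p sz : List Nat} (inv : pvInv n p sz) {a : Nat} (ha : a < n)
    (h : p.getD a 0 ≠ a) : p.getD (p.getD a 0) 0 ≠ a := by
  intro hEq
  have := (pvGrand inv ha h).1
  rw [hEq] at this
  omega

theorem pvInv_compress {n : Nat} {p sz : List Nat} (inv : pvInv n p sz) {a : Nat} (ha : a < n)
    (h : p.getD a 0 ≠ a) : pvInv n (p.set a (p.getD (p.getD a 0) 0)) sz := by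
  obtain ⟨hsz, hlt⟩ := pvGrand inv ha h
  refine ⟨by simp [inv.plen], inv.szlen, ?_, inv.pos, ?_⟩
  · intro x hx
    by_cases hxa : x = a
    · subst hxa; rw [pvGetD_set_self _ _ _ _ (by rw [inv.plen]; exact ha)]; exact hlt
    · rw [pvGetD_set_ne _ _ _ _ _ hxa]; exact inv.bound x hx
  · intro x hx hne
    by_cases hxa : x = a
    · subst hxa
      rw [pvGetD_set_self _ _ _ _ (by rw [inv.plen]; exact ha)] at *
      exact hsz
    · rw [pvGetD_set_ne _ _ _ _ _ hxa] at *
      exact inv.inc x hx hne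

theorem pvRootOf_compress_fw {n : Nat} {p sz : List Nat} (inv : pvInv n p sz) {a : Nat}
    (ha : a < n) (hne : p.getD a 0 ≠ a) {x r : Nat} (h : pvRootOf p x r) :
    pvRootOf (p.set a (p.getD (p.getD a 0) 0)) x r := by
  have hlen : a < p.length := by rw [inv.plen]; exact ha
  have hgne := pvGrand_ne inv ha hne
  induction h with
  | self x hx =>
    have hxa : x ≠ a := fun hEq => hne (hEq ▸ hx)
    exact pvRootOf.self x (by rw [pvGetD_set_ne _ _ _ _ _ hxa]; exact hx)
  | step x r hx hr ih =>
    by_cases hxa : x = a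
    · subst hxa
      by_cases hroot : p.getD (p.getD x 0) 0 = p.getD x 0
      · -- parent is a root: r = p[x], and p[x] stays a root
        have hrEq : r = p.getD x 0 := by
          cases hr with
          | self _ h2 => rfl
          | step _ _ h2 => exact absurd hroot h2
        subst hrEq
        refine pvRootOf.step x _ ?_ ?_
        · rw [pvGetD_set_self _ _ _ _ hlen]; exact hgne
        · rw [pvGetD_set_self _ _ _ _ hlen, hroot]
          refine pvRootOf.self _ ?_
          rw [pvGetD_set_ne _ _ _ _ _ hx]
          exact hroot
      · -- parent not a root: ih gives the chain from p[x]; step past it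
        have hpane : p.getD x 0 ≠ x := hx
        have : pvRootOf (p.set x (p.getD (p.getD x 0) 0)) (p.getD (p.getD x 0) 0) r := by
          cases ih with
          | self _ h2 =>
            exfalso
            rw [pvGetD_set_ne _ _ _ _ _ hx] at h2
            exact hroot h2
          | step _ _ h2 h3 =>
            rwa [pvGetD_set_ne _ _ _ _ _ hx] at h3
        refine pvRootOf.step x r ?_ ?_
        · rw [pvGetD_set_self _ _ _ _ hlen]; exact hgne
        · rw [pvGetD_set_self _ _ _ _ hlen]; exact this
    · exact pvRootOf.step x r
        (by rw [pvGetD_set_ne _ _ _ _ _ hxa]; exact hx)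
        (by rw [pvGetD_set_ne _ _ _ _ _ hxa]; exact ih)

theorem pvRootOf_compress_iff {n : Nat} {p sz : List Nat} (inv : pvInv n p sz) {a : Nat}
    (ha : a < n) (hne : p.getD a 0 ≠ a) {x r : Nat} (hx : x < n) :
    pvRootOf p x r ↔ pvRootOf (p.set a (p.getD (p.getD a 0) 0)) x r := by
  constructor
  · exact pvRootOf_compress_fw inv ha hne
  · intro h
    obtain ⟨r0, h0⟩ := pvRootOf_exists inv x hx
    have := pvRootOf_compress_fw inv ha hne h0
    rw [pvRootOf_unique h this]
    exact h0

theorem pvRoots_compress {n : Nat} {p sz : List Nat} (inv : pvInv n p sz) {a : Nat}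
    (ha : a < n) (hne : p.getD a 0 ≠ a) (x : Nat) :
    ((p.set a (p.getD (p.getD a 0) 0)).getD x 0 = x ↔ p.getD x 0 = x) := by
  by_cases hxa : x = a
  · subst hxa
    rw [pvGetD_set_self _ _ _ _ (by rw [inv.plen]; exact ha)]
    exact ⟨fun h => absurd h (pvGrand_ne inv ha hne), fun h => absurd h hne⟩
  · rw [pvGetD_set_ne _ _ _ _ _ hxa]

theorem pvFind_spec {n : Nat} {sz : List Nat} :
    ∀ (fuel : Nat) (p : List Nat) (a r : Nat), pvInv n p sz → a < n → pvRootOf p a r →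
      pvMu n sz a < fuel →
      ∃ p', pvFind fuel p a = (p', r) ∧ pvInv n p' sz ∧
        (∀ x rr, x < n → (pvRootOf p x rr ↔ pvRootOf p' x rr)) ∧
        (∀ x, p'.getD x 0 = x ↔ p.getD x 0 = x) := by
  intro fuel
  induction fuel with
  | zero => intro p a r _ _ _ hmu; omega
  | succ fuel ih =>
    intro p a r inv ha hr hmu
    show _
    rw [pvFind]
    by_cases hpa : p.getD a 0 = a
    · simp only [hpa, if_true]
      have : r = a := by
        cases hr with
        | self => rfl
        | step _ _ h2 => exact absurd hpa h2
      subst this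
      exact ⟨p, rfl, inv, fun x rr hx => Iff.rfl, fun x => Iff.rfl⟩
    · simp only [if_neg hpa]
      have hgrand := pvGrand inv ha hpa
      have inv' := pvInv_compress inv ha hpa
      have hna : p.getD (p.getD a 0) 0 < n := hgrand.2
      -- the chain from the grandparent still reaches r
      have hr1 : pvRootOf p (p.getD a 0) r := by
        cases hr with
        | self _ h2 => exact absurd h2 hpa
        | step _ _ _ h3 => exact h3
      have hr2 : pvRootOf p (p.getD (p.getD a 0) 0) r := by
        by_cases hroot : p.getD (p.getD a 0) 0 = p.getD a 0
        · rw [hroot]; exact hr1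
        · cases hr1 with
          | self _ h2 => exact absurd h2 hroot
          | step _ _ _ h3 => exact h3
      have hr2' := pvRootOf_compress_fw inv ha hpa hr2
      have hmu' : pvMu n sz (p.getD (p.getD a 0) 0) < fuel := by
        have := pvMu_lt hgrand.2 hgrand.1
        omega
      obtain ⟨p', hfind, inv'', hiff, hroots⟩ :=
        ih (p.set a (p.getD (p.getD a 0) 0)) (p.getD (p.getD a 0) 0) r inv' hna hr2' hmu'
      refine ⟨p', hfind, inv'', ?_, ?_⟩
      · intro x rr hx
        rw [pvRootOf_compress_iff inv ha hpa hx]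
        exact hiff x rr hx
      · intro x
        rw [hroots x]
        exact pvRoots_compress inv ha hpa x

theorem pvAdjacent_symm {E : List (Nat × Nat)} {x y : Nat} (h : pvAdjacent E x y) :
    pvAdjacent E y x := h.elim Or.inr Or.inl

theorem pvReach_symm {E : List (Nat × Nat)} {x y : Nat} (h : pvReach E x y) : pvReach E y x := by
  induction h with
  | refl => exact Relation.ReflTransGen.refl
  | tail _ hadj ih =>
    exact Relation.ReflTransGen.trans (Relation.ReflTransGen.single (pvAdjacent_symm hadj)) ih

theorem pvReach_mono {E : List (Nat × Nat)} {e : Nat × Nat} {x y : Nat} (h : pvReach E x y) :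
    pvReach (E ++ [e]) x y := by
  induction h with
  | refl => exact Relation.ReflTransGen.refl
  | tail _ hadj ih =>
    refine Relation.ReflTransGen.tail ih ?_
    rcases hadj with h1 | h1
    · exact Or.inl (by simp [h1])
    · exact Or.inr (by simp [h1])

theorem pvReach_append {E : List (Nat × Nat)} {u v x y : Nat} :
    pvReach (E ++ [(u, v)]) x y ↔
      pvReach E x y ∨ (pvReach E x u ∧ pvReach E v y) ∨ (pvReach E x v ∧ pvReach E u y) := by
  constructor
  · intro h
    induction h with
    | refl => exact Or.inl Relation.ReflTransGen.refl
    | @tail b c _ hadj ih =>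
      have hadj' : pvAdjacent E b c ∨ (b = u ∧ c = v) ∨ (b = v ∧ c = u) := by
        rcases hadj with h1 | h1 <;> simp only [List.mem_append, List.mem_singleton] at h1 <;>
          rcases h1 with h1 | h1
        · exact Or.inl (Or.inl h1)
        · exact Or.inr (Or.inl ⟨by simp_all, by simp_all⟩)
        · exact Or.inl (Or.inr h1)
        · exact Or.inr (Or.inr ⟨by simp_all, by simp_all⟩)
      rcases hadj' with h1 | ⟨h1, h2⟩ | ⟨h1, h2⟩
      · rcases ih with ih | ⟨ih1, ih2⟩ | ⟨ih1, ih2⟩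
        · exact Or.inl (Relation.ReflTransGen.tail ih h1)
        · exact Or.inr (Or.inl ⟨ih1, Relation.ReflTransGen.tail ih2 h1⟩)
        · exact Or.inr (Or.inr ⟨ih1, Relation.ReflTransGen.tail ih2 h1⟩)
      · subst h1; subst h2
        rcases ih with ih | ⟨ih1, ih2⟩ | ⟨ih1, ih2⟩
        · exact Or.inr (Or.inl ⟨ih, Relation.ReflTransGen.refl⟩)
        · exact Or.inr (Or.inl ⟨ih1, Relation.ReflTransGen.refl⟩)
        · exact Or.inl ih1
      · subst h1; subst h2
        rcases ih with ih | ⟨ih1, ih2⟩ | ⟨ih1, ih2⟩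
        · exact Or.inr (Or.inr ⟨ih, Relation.ReflTransGen.refl⟩)
        · exact Or.inl ih1
        · exact Or.inr (Or.inr ⟨ih1, Relation.ReflTransGen.refl⟩)
  · intro h
    have hedge : pvReach (E ++ [(u, v)]) u v :=
      Relation.ReflTransGen.single (Or.inl (by simp))
    rcases h with h | ⟨h1, h2⟩ | ⟨h1, h2⟩
    · exact pvReach_mono h
    · exact Relation.ReflTransGen.trans (pvReach_mono h1)
        (Relation.ReflTransGen.trans hedge (pvReach_mono h2))
    · exact Relation.ReflTransGen.trans (pvReach_mono h1)
        (Relation.ReflTransGen.trans (pvReach_symm hedge) (pvReach_mono h2))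

-- linking root rb under root ra
theorem pvRootOf_link_fw {p : List Nat} {ra rb : Nat} (hlen : rb < p.length)
    (hra : p.getD ra 0 = ra) (hrb : p.getD rb 0 = rb) (hne : ra ≠ rb) {x r : Nat}
    (h : pvRootOf p x r) :
    pvRootOf (p.set rb ra) x (if r = rb then ra else r) := by
  induction h with
  | self x hx =>
    by_cases hxb : x = rb
    · subst hxb
      have hif : (if x = x then ra else x) = ra := if_pos rfl
      rw [hif]
      refine pvRootOf.step x ra ?_ ?_
      · rw [pvGetD_set_self _ _ _ _ hlen]; exact Ne.symm (fun hEq => hne (hEq ▸ rfl))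
      · rw [pvGetD_set_self _ _ _ _ hlen]
        exact pvRootOf.self ra (by rw [pvGetD_set_ne _ _ _ _ _ hne]; exact hra)
    · simp only [if_neg hxb]
      exact pvRootOf.self x (by rw [pvGetD_set_ne _ _ _ _ _ hxb]; exact hx)
  | step x r hx hr ih =>
    have hxb : x ≠ rb := fun hEq => hx (hEq ▸ hrb)
    exact pvRootOf.step x _ (by rw [pvGetD_set_ne _ _ _ _ _ hxb]; exact hx)
      (by rw [pvGetD_set_ne _ _ _ _ _ hxb]; exact ih)

theorem pvInv_link {n : Nat} {p sz : List Nat} (inv : pvInv n p sz) {ra rb : Nat}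
    (hran : ra < n) (hrbn : rb < n) (hra : p.getD ra 0 = ra) (hrb : p.getD rb 0 = rb)
    (hne : ra ≠ rb) :
    pvInv n (p.set rb ra) (sz.set ra (sz.getD ra 0 + sz.getD rb 0)) := by
  have hlen : rb < p.length := by rw [inv.plen]; exact hrbn
  have hposa := inv.pos ra hran
  have hposb := inv.pos rb hrbn
  refine ⟨by simp [inv.plen], by simp [inv.szlen], ?_, ?_, ?_⟩
  · intro x hxn
    by_cases hxb : x = rb
    · subst hxb; rw [pvGetD_set_self _ _ _ _ hlen]; exact hran
    · rw [pvGetD_set_ne _ _ _ _ _ hxb]; exact inv.bound x hxn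
  · intro x hxn
    by_cases hxa : x = ra
    · subst hxa
      rw [pvGetD_set_self _ _ _ _ (by rw [inv.szlen]; exact hran)]
      omega
    · rw [pvGetD_set_ne _ _ _ _ _ hxa]; exact inv.pos x hxn
  · intro x hxn hxne
    by_cases hxb : x = rb
    · subst hxb
      rw [pvGetD_set_self _ _ _ _ hlen] at *
      rw [pvGetD_set_ne _ _ _ _ _ (Ne.symm hne), pvGetD_set_self _ _ _ _ (by rw [inv.szlen]; exact hran)]
      omega
    · rw [pvGetD_set_ne _ _ _ _ _ hxb] at *
      have hxra : x ≠ ra := by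
        intro hEq; subst hEq; exact hxne hra
      rw [pvGetD_set_ne _ _ _ _ _ hxra]
      by_cases hpx : p.getD x 0 = ra
      · rw [hpx, pvGetD_set_self _ _ _ _ (by rw [inv.szlen]; exact hran)]
        have := inv.inc x hxn hxne
        rw [hpx] at this
        omega
      · rw [pvGetD_set_ne _ _ _ _ _ hpx]
        exact inv.inc x hxn hxne

theorem pvRoots_link {p : List Nat} {ra rb : Nat} (hlen : rb < p.length) (hne : ra ≠ rb)
    (x : Nat) : ((p.set rb ra).getD x 0 = x ↔ p.getD x 0 = x ∧ x ≠ rb) := by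
  by_cases hxb : x = rb
  · subst hxb
    rw [pvGetD_set_self _ _ _ _ hlen]
    simp only [ne_eq, not_true_eq_false, and_false, iff_false]
    exact hne
  · rw [pvGetD_set_ne _ _ _ _ _ hxb]
    simp [hxb]

theorem pvMu_lt_n {n : Nat} {sz : List Nat} {a : Nat} (ha : a < n) : pvMu n sz a < n := by
  unfold pvMu
  have h1 : ((Finset.range n).filter (fun b => sz.getD a 0 < sz.getD b 0)) ⊂ Finset.range n := by
    refine Finset.ssubset_iff_of_subset (Finset.filter_subset _ _) |>.mpr ?_
    exact ⟨a, Finset.mem_range.mpr ha, by simp⟩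
  have := Finset.card_lt_card h1
  simpa using this

theorem pvREq_root_iff {n : Nat} {p sz : List Nat} (inv : pvInv n p sz) {x y rx ry : Nat}
    (hrx : pvRootOf p x rx) (hry : pvRootOf p y ry) : (pvREq p x y ↔ rx = ry) := by
  constructor
  · rintro ⟨r, h1, h2⟩
    rw [pvRootOf_unique hrx h1, pvRootOf_unique hry h2]
  · rintro rfl
    exact ⟨rx, hrx, hry⟩

theorem pvLinkGood {n : Nat} {p2 sz : List Nat} {cc : Int} {E : List (Nat × Nat)}
    {u v ra rb ru rv : Nat}
    (inv2 : pvInv n p2 sz)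
    (hchar2 : ∀ x y, x < n → y < n → (pvREq p2 x y ↔ pvReach E x y))
    (hcc2 : cc = (((Finset.range n).filter (fun a => p2.getD a 0 = a)).card : Int))
    (hu : u < n) (hv : v < n)
    (hru2 : pvRootOf p2 u ru) (hrv2 : pvRootOf p2 v rv) (hne : ru ≠ rv)
    (hab : (ra = ru ∧ rb = rv) ∨ (ra = rv ∧ rb = ru)) :
    pvDSUGood n (p2.set rb ra) (sz.set ra (sz.getD ra 0 + sz.getD rb 0)) (cc - 1)
      (E ++ [(u, v)]) := by
  have hrun : ru < n := pvRootOf_lt inv2 hu hru2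
  have hrvn : rv < n := pvRootOf_lt inv2 hv hrv2
  have hruroot : p2.getD ru 0 = ru := pvRootOf_isRoot hru2
  have hrvroot : p2.getD rv 0 = rv := pvRootOf_isRoot hrv2
  have hran : ra < n := by rcases hab with ⟨rfl, _⟩ | ⟨rfl, _⟩ <;> assumption
  have hrbn : rb < n := by rcases hab with ⟨_, rfl⟩ | ⟨_, rfl⟩ <;> assumption
  have hra : p2.getD ra 0 = ra := by rcases hab with ⟨rfl, _⟩ | ⟨rfl, _⟩ <;> assumption
  have hrb : p2.getD rb 0 = rb := by rcases hab with ⟨_, rfl⟩ | ⟨_, rfl⟩ <;> assumption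
  have hanb : ra ≠ rb := by
    rcases hab with ⟨rfl, rfl⟩ | ⟨rfl, rfl⟩
    · exact hne
    · exact Ne.symm hne
  have hlen : rb < p2.length := by rw [inv2.plen]; exact hrbn
  refine ⟨pvInv_link inv2 hran hrbn hra hrb hanb, ?_, ?_⟩
  · -- component count decreases by exactly one
    have hfilter : (Finset.range n).filter (fun a => (p2.set rb ra).getD a 0 = a) =
        ((Finset.range n).filter (fun a => p2.getD a 0 = a)).erase rb := by
      ext a
      simp only [Finset.mem_filter, Finset.mem_erase, Finset.mem_range]
      rw [pvRoots_link hlen hanb a]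
      tauto
    have hmem : rb ∈ (Finset.range n).filter (fun a => p2.getD a 0 = a) :=
      Finset.mem_filter.mpr ⟨Finset.mem_range.mpr hrbn, hrb⟩
    have hpos : 0 < ((Finset.range n).filter (fun a => p2.getD a 0 = a)).card :=
      Finset.card_pos.mpr ⟨rb, hmem⟩
    rw [hfilter, Finset.card_erase_of_mem hmem, hcc2]
    push_cast [Nat.cast_sub (by omega : 1 ≤ ((Finset.range n).filter (fun a => p2.getD a 0 = a)).card)]
    ring
  · intro x y hx hy
    obtain ⟨rx, hrx⟩ := pvRootOf_exists inv2 x hx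
    obtain ⟨ry, hry⟩ := pvRootOf_exists inv2 y hy
    have fx := pvRootOf_link_fw hlen hra hrb hanb hrx
    have fy := pvRootOf_link_fw hlen hra hrb hanb hry
    have inv' := pvInv_link inv2 hran hrbn hra hrb hanb
    rw [pvREq_root_iff inv' fx fy, pvReach_append,
      ← hchar2 x y hx hy, ← hchar2 x u hx hu, ← hchar2 v y hv hy,
      ← hchar2 x v hx hv, ← hchar2 u y hu hy,
      pvREq_root_iff inv2 hrx hry, pvREq_root_iff inv2 hrx hru2,
      pvREq_root_iff inv2 hrv2 hry, pvREq_root_iff inv2 hrx hrv2,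
      pvREq_root_iff inv2 hru2 hry]
    rcases hab with ⟨rfl, rfl⟩ | ⟨rfl, rfl⟩ <;> split_ifs <;> simp_all <;> omega

theorem pvUnion_spec {n : Nat} {p sz : List Nat} {cc : Int} {E : List (Nat × Nat)}
    (good : pvDSUGood n p sz cc E) {u v : Nat} (hu : u < n) (hv : v < n) (huv : u ≠ v) :
    pvDSUGood n (pvUnion p sz cc u v).1 (pvUnion p sz cc u v).2.1 (pvUnion p sz cc u v).2.2
      (E ++ [(u, v)]) := by
  obtain ⟨inv, hcc, hchar⟩ := good
  obtain ⟨ru, hru⟩ := pvRootOf_exists inv u hu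
  obtain ⟨p1, hf1, inv1, hiff1, hroots1⟩ :=
    pvFind_spec p.length p u ru inv hu hru (by rw [inv.plen]; exact pvMu_lt_n hu)
  obtain ⟨rv, hrv1⟩ := pvRootOf_exists inv1 v hv
  obtain ⟨p2, hf2, inv2, hiff2, hroots2⟩ :=
    pvFind_spec p1.length p1 v rv inv1 hv hrv1 (by rw [inv1.plen]; exact pvMu_lt_n hv)
  -- roots in p2 of u and v
  have hru2 : pvRootOf p2 u ru := (hiff2 u ru hu).mp ((hiff1 u ru hu).mp hru)
  have hrv2 : pvRootOf p2 v rv := (hiff2 v rv hv).mp hrv1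
  have hrun : ru < n := pvRootOf_lt inv hu hru
  have hrvn : rv < n := pvRootOf_lt inv1 hv hrv1
  have hruroot : p2.getD ru 0 = ru := pvRootOf_isRoot hru2
  have hrvroot : p2.getD rv 0 = rv := pvRootOf_isRoot hrv2
  -- class characterization carries over to p2
  have hchar2 : ∀ x y, x < n → y < n → (pvREq p2 x y ↔ pvReach E x y) := by
    intro x y hx hy
    rw [← hchar x y hx hy]
    unfold pvREq
    constructor
    · rintro ⟨r, h1, h2⟩
      exact ⟨r, (hiff1 x r hx).mpr ((hiff2 x r hx).mpr h1),
        (hiff1 y r hy).mpr ((hiff2 y r hy).mpr h2)⟩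
    · rintro ⟨r, h1, h2⟩
      exact ⟨r, (hiff2 x r hx).mp ((hiff1 x r hx).mp h1),
        (hiff2 y r hy).mp ((hiff1 y r hy).mp h2)⟩
  have hrootsp2 : ∀ x, p2.getD x 0 = x ↔ p.getD x 0 = x := by
    intro x
    rw [hroots2 x, hroots1 x]
  have hcc2 : cc = (((Finset.range n).filter (fun a => p2.getD a 0 = a)).card : Int) := by
    rw [hcc]
    congr 1
    exact congrArg _ (Finset.filter_congr (fun x _ => by rw [hrootsp2 x])).symm
  unfold pvUnion
  simp only [hf1, hf2]
  by_cases hrr : ru = rv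
  · simp only [if_pos hrr]
    refine ⟨inv2, hcc2, ?_⟩
    intro x y hx hy
    rw [hchar2 x y hx hy, pvReach_append]
    have hreach_uv : pvReach E u v := (hchar2 u v hu hv).mp ⟨ru, hru2, hrr ▸ hrv2⟩
    constructor
    · exact Or.inl
    · rintro (h | ⟨h1, h2⟩ | ⟨h1, h2⟩)
      · exact h
      · exact Relation.ReflTransGen.trans h1 (Relation.ReflTransGen.trans hreach_uv h2)
      · exact Relation.ReflTransGen.trans h1
          (Relation.ReflTransGen.trans (pvReach_symm hreach_uv) h2)
  · simp only [if_neg hrr]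
    by_cases hsz : sz.getD ru 0 < sz.getD rv 0
    · simp only [if_pos hsz]
      exact pvLinkGood inv2 hchar2 hcc2 hu hv hru2 hrv2 hrr (Or.inr ⟨rfl, rfl⟩)
    · simp only [if_neg hsz]
      exact pvLinkGood inv2 hchar2 hcc2 hu hv hru2 hrv2 hrr (Or.inl ⟨rfl, rfl⟩)

theorem pvCCOne {n : Nat} {p sz : List Nat} {cc : Int} {E : List (Nat × Nat)}
    (good : pvDSUGood n p sz cc E) (hn : 0 < n) :
    (cc = 1 ↔ ∀ x, x < n → pvReach E 0 x) := by
  obtain ⟨inv, hcc, hchar⟩ := good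
  obtain ⟨r0, hr0⟩ := pvRootOf_exists inv 0 hn
  have hr0n : r0 < n := pvRootOf_lt inv hn hr0
  have hr0root : p.getD r0 0 = r0 := pvRootOf_isRoot hr0
  constructor
  · intro h1 x hx
    have hcard : ((Finset.range n).filter (fun a => p.getD a 0 = a)).card = 1 := by
      rw [hcc] at h1; exact_mod_cast h1
    obtain ⟨a, ha⟩ := Finset.card_eq_one.mp hcard
    obtain ⟨rx, hrx⟩ := pvRootOf_exists inv x hx
    have hrxn : rx < n := pvRootOf_lt inv hx hrx
    have hmem1 : rx ∈ (Finset.range n).filter (fun b => p.getD b 0 = b) :=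
      Finset.mem_filter.mpr ⟨Finset.mem_range.mpr hrxn, pvRootOf_isRoot hrx⟩
    have hmem0 : r0 ∈ (Finset.range n).filter (fun b => p.getD b 0 = b) :=
      Finset.mem_filter.mpr ⟨Finset.mem_range.mpr hr0n, hr0root⟩
    rw [ha, Finset.mem_singleton] at hmem1 hmem0
    exact (hchar 0 x hn hx).mp ⟨r0, hr0, by rw [hmem0, ← hmem1]; exact hrx⟩
  · intro h
    have hall : ∀ x, x < n → pvRootOf p x r0 := by
      intro x hx
      obtain ⟨r, h0, hx'⟩ := (hchar 0 x hn hx).mpr (h x hx)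
      rwa [pvRootOf_unique hr0 h0]
    have hfil : (Finset.range n).filter (fun a => p.getD a 0 = a) = {r0} := by
      ext a
      simp only [Finset.mem_filter, Finset.mem_range, Finset.mem_singleton]
      constructor
      · rintro ⟨han, haroot⟩
        exact pvRootOf_unique (pvRootOf.self a haroot) (hall a han)
      · rintro rfl
        exact ⟨hr0n, hr0root⟩
    rw [hcc, hfil]
    simp

theorem pvGetD_true_lt (l : List Bool) (x : Nat) (h : l.getD x false = true) : x < l.length := by
  by_contra hx
  rw [List.getD_eq_default _ _ (by omega)] at h
  exact Bool.false_ne_true h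

theorem pvCountP_set_true (l : List Bool) (v : Nat) (hv : v < l.length)
    (hf : l.getD v false = false) :
    (l.set v true).countP (fun b => b = true) = l.countP (fun b => b = true) + 1 := by
  induction l generalizing v with
  | nil => simp at hv
  | cons a l ih =>
    cases v with
    | zero => simp_all
    | succ v =>
      simp only [List.set]
      simp only [List.length_cons, Nat.succ_lt_succ_iff] at hv
      have := ih v hv (by simpa [List.getD] using hf)
      simp only [List.countP_cons]
      omega

structure pvNbrOut (vis : List Bool) (cnt : Int) (stk : List Nat) (ns : List Nat)
    (vis' : List Bool) (cnt' : Int) (stk' : List Nat) : Prop where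
  len : vis'.length = vis.length
  mono : ∀ x, vis.getD x false = true → vis'.getD x false = true
  nsvis : ∀ y ∈ ns, y < vis.length → vis'.getD y false = true
  new : ∀ x, vis'.getD x false = true → vis.getD x false = true ∨ x ∈ ns
  stksub : ∀ x ∈ stk, x ∈ stk'
  stknew : ∀ x ∈ stk', x ∈ stk ∨ (x ∈ ns ∧ vis'.getD x false = true)
  newstk : ∀ x, vis'.getD x false = true → vis.getD x false = true ∨ x ∈ stk'
  cntEq : cnt = (vis.countP (fun b => b = true) : Int) →
    cnt' = (vis'.countP (fun b => b = true) : Int)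

theorem pvNeighbors_spec :
    ∀ (ns : List Nat) (vis : List Bool) (cnt : Int) (stk : List Nat),
      pvNbrOut vis cnt stk ns (pvNeighbors vis cnt stk ns).1
        (pvNeighbors vis cnt stk ns).2.1 (pvNeighbors vis cnt stk ns).2.2 := by
  intro ns
  induction ns with
  | nil =>
    intro vis cnt stk
    exact ⟨rfl, fun x h => h, by simp, fun x h => Or.inl h, fun x h => h,
      fun x h => Or.inl h, fun x h => Or.inl h, fun h => h⟩
  | cons v vs ih =>
    intro vis cnt stk
    by_cases h : v < vis.length ∧ vis.getD v false = false
    · simp only [pvNeighbors, if_pos h]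
      have spec := ih (vis.set v true) (cnt + 1) (v :: stk)
      have hvset : (vis.set v true).getD v false = true :=
        pvGetD_set_self _ _ _ _ h.1
      refine ⟨by rw [spec.len]; simp, ?_, ?_, ?_, ?_, ?_, ?_, ?_⟩
      · intro x hx
        apply spec.mono
        by_cases hxv : x = v
        · subst hxv; exact hvset
        · rw [pvGetD_set_ne _ _ _ _ _ hxv]; exact hx
      · intro y hy hylen
        rcases List.mem_cons.mp hy with rfl | hy'
        · exact spec.mono _ hvset
        · exact spec.nsvis y hy' (by simpa using hylen)
      · intro x hx
        rcases spec.new x hx with h1 | h1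
        · by_cases hxv : x = v
          · subst hxv; exact Or.inr (by simp)
          · rw [pvGetD_set_ne _ _ _ _ _ hxv] at h1; exact Or.inl h1
        · exact Or.inr (List.mem_cons_of_mem _ h1)
      · intro x hx; exact spec.stksub x (List.mem_cons_of_mem _ hx)
      · intro x hx
        rcases spec.stknew x hx with h1 | ⟨h1, h2⟩
        · rcases List.mem_cons.mp h1 with rfl | h2
          · exact Or.inr ⟨by simp, spec.mono _ hvset⟩
          · exact Or.inl h2
        · exact Or.inr ⟨List.mem_cons_of_mem _ h1, h2⟩
      · intro x hx
        rcases spec.newstk x hx with h1 | h1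
        · by_cases hxv : x = v
          · subst hxv; exact Or.inr (spec.stksub _ (by simp))
          · rw [pvGetD_set_ne _ _ _ _ _ hxv] at h1; exact Or.inl h1
        · exact Or.inr h1
      · intro hc
        apply spec.cntEq
        rw [pvCountP_set_true vis v h.1 h.2, hc]
        push_cast
        ring
    · simp only [pvNeighbors, if_neg h]
      have spec := ih vis cnt stk
      refine ⟨spec.len, spec.mono, ?_, ?_, spec.stksub, ?_, spec.newstk, spec.cntEq⟩
      · intro y hy hylen
        rcases List.mem_cons.mp hy with rfl | hy'
        · -- v is already visited (the branch was not taken and v is in range)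
          have : vis.getD y false = true := by
            rcases Decidable.not_and_iff_or_not.mp h with h1 | h1
            · omega
            · simpa using h1
          exact spec.mono _ this
        · exact spec.nsvis y hy' hylen
      · intro x hx
        rcases spec.new x hx with h1 | h1
        · exact Or.inl h1
        · exact Or.inr (List.mem_cons_of_mem _ h1)
      · intro x hx
        rcases spec.stknew x hx with h1 | ⟨h1, h2⟩
        · exact Or.inl h1
        · exact Or.inr ⟨List.mem_cons_of_mem _ h1, h2⟩

structure pvDFSInv (n : Nat) (adj : List (List Nat)) (E : List (Nat × Nat))
    (vis : List Bool) (cnt : Int) (stk : List Nat) : Prop where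
  vlen : vis.length = n
  stkmem : ∀ x ∈ stk, vis.getD x false = true
  zero : vis.getD 0 false = true
  sound : ∀ x, vis.getD x false = true → pvReach E 0 x
  frontier : ∀ x, vis.getD x false = true →
    x ∈ stk ∨ ∀ y ∈ adj.getD x [], vis.getD y false = true
  count : cnt = (vis.countP (fun b => b = true) : Int)

theorem pvDfsLoop_spec {n : Nat} {adj : List (List Nat)} {E : List (Nat × Nat)}
    (hadj : pvAdjGood n adj E) (hE : pvEGood n E) :
    ∀ (vis : List Bool) (cnt : Int) (stk : List Nat), pvDFSInv n adj E vis cnt stk →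
      (pvDfsLoop adj vis cnt stk).1.length = n ∧
      (pvDfsLoop adj vis cnt stk).2 =
        ((pvDfsLoop adj vis cnt stk).1.countP (fun b => b = true) : Int) ∧
      (pvDfsLoop adj vis cnt stk).1.getD 0 false = true ∧
      (∀ x, (pvDfsLoop adj vis cnt stk).1.getD x false = true → pvReach E 0 x) ∧
      (∀ x, (pvDfsLoop adj vis cnt stk).1.getD x false = true →
        ∀ y ∈ adj.getD x [], (pvDfsLoop adj vis cnt stk).1.getD y false = true) := by
  intro vis cnt stk
  induction vis, cnt, stk using pvDfsLoop.induct adj with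
  | case1 vis cnt =>
    intro inv
    rw [pvDfsLoop]
    refine ⟨inv.vlen, inv.count, inv.zero, inv.sound, ?_⟩
    intro x hx y hy
    rcases inv.frontier x hx with h | h
    · simp at h
    · exact h y hy
  | case2 vis cnt u rest s ih =>
    intro inv
    rw [pvDfsLoop]
    have spec := pvNeighbors_spec (adj.getD u []) vis cnt rest
    have hu : vis.getD u false = true := inv.stkmem u (by simp)
    have hun : u < n := by
      have h1 := pvGetD_true_lt vis u hu
      have h2 := inv.vlen
      omega
    have hns : ∀ y ∈ adj.getD u [], y < n := by
      intro y hy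
      rcases (hadj.2 u y hun).mp hy with h1 | h1
      · exact (hE _ h1).2.1
      · exact (hE _ h1).1
    apply ih
    constructor
    · rw [spec.len, inv.vlen]
    · intro x hx
      rcases spec.stknew x hx with h1 | ⟨h1, h2⟩
      · exact spec.mono _ (inv.stkmem x (List.mem_cons_of_mem _ h1))
      · exact h2
    · exact spec.mono _ inv.zero
    · intro x hx
      rcases spec.new x hx with h1 | h1
      · exact inv.sound x h1
      · exact Relation.ReflTransGen.tail (inv.sound u hu) ((hadj.2 u x hun).mp h1)
    · intro x hx
      rcases spec.new x hx with h1 | h1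
      · -- x was visited before this step
        rcases inv.frontier x h1 with h2 | h2
        · rcases List.mem_cons.mp h2 with rfl | h3
          · -- x = u: all its neighbours are visited now
            right
            intro y hy
            exact spec.nsvis y hy (by rw [inv.vlen]; exact hns y hy)
          · exact Or.inl (spec.stksub x h3)
        · exact Or.inr (fun y hy => spec.mono _ (h2 y hy))
      · -- x newly visited: it is on the new stack
        rcases spec.newstk x hx with h2 | h2
        · rcases inv.frontier x h2 with h3 | h3
          · rcases List.mem_cons.mp h3 with rfl | h4
            · right
              intro y hy
              exact spec.nsvis y hy (by rw [inv.vlen]; exact hns y hy)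
            · exact Or.inl (spec.stksub x h4)
          · exact Or.inr (fun y hy => spec.mono _ (h3 y hy))
        · exact Or.inl h2
    · exact spec.cntEq inv.count

theorem pvDfsClosed_reach {n : Nat} {adj : List (List Nat)} {E : List (Nat × Nat)}
    (hadj : pvAdjGood n adj E) {vis : List Bool} (hlen : vis.length = n)
    (hzero : vis.getD 0 false = true)
    (hclosed : ∀ x, vis.getD x false = true → ∀ y ∈ adj.getD x [], vis.getD y false = true)
    {x : Nat} (hx : pvReach E 0 x) : vis.getD x false = true := by
  induction hx with
  | refl => exact hzero
  | @tail b c _ hadjbc ih =>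
    have hbn : b < n := by have := pvGetD_true_lt vis b ih; omega
    exact hclosed b ih c ((hadj.2 b c hbn).mpr hadjbc)

theorem pvAdjGood_add {n : Nat} {adj : List (List Nat)} {E : List (Nat × Nat)} {u v : Nat}
    (h : pvAdjGood n adj E) (hu : u < n) (hv : v < n) (huv : u ≠ v) :
    pvAdjGood n
      ((adj.set u (adj.getD u [] ++ [v])).set v
        ((adj.set u (adj.getD u [] ++ [v])).getD v [] ++ [u])) (E ++ [(u, v)]) := by
  have hul : u < adj.length := by rw [h.1]; exact hu
  have hvl : v < (adj.set u (adj.getD u [] ++ [v])).length := by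
    rw [List.length_set, h.1]; exact hv
  constructor
  · simp [h.1]
  · intro x y hx
    have hmem : y ∈ ((adj.set u (adj.getD u [] ++ [v])).set v
        ((adj.set u (adj.getD u [] ++ [v])).getD v [] ++ [u])).getD x [] ↔
        y ∈ adj.getD x [] ∨ (x = u ∧ y = v) ∨ (x = v ∧ y = u) := by
      by_cases hxv : x = v
      · subst hxv
        rw [pvGetD_set_self _ _ _ _ hvl, pvGetD_set_ne _ _ _ _ _ (Ne.symm huv)]
        simp [Ne.symm huv]
      · rw [pvGetD_set_ne _ _ _ _ _ hxv]
        by_cases hxu : x = u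
        · subst hxu
          rw [pvGetD_set_self _ _ _ _ hul]
          simp [hxv]
        · rw [pvGetD_set_ne _ _ _ _ _ hxu]
          simp [hxu, hxv]
    rw [hmem]
    rw [h.2 x y hx]
    unfold pvAdjacent
    simp only [List.mem_append, List.mem_singleton, Prod.mk.injEq]
    tauto

theorem pvLoop_rel (lines : List String) (idx nI : Int) :
    ∀ (k j : Nat) (p sz : List Nat) (cc : Int) (adj : List (List Nat)) (E : List (Nat × Nat)),
      pvDSUGood nI.toNat p sz cc E → pvAdjGood nI.toNat adj E → pvEGood nI.toNat E →
      (pvALoop lines idx nI j k (p, sz, cc) = none ∧ pvBLoop lines idx nI j k adj = none) ∨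
      (∃ st' adj' E', pvALoop lines idx nI j k (p, sz, cc) = some st' ∧
        pvBLoop lines idx nI j k adj = some adj' ∧
        pvDSUGood nI.toNat st'.1 st'.2.1 st'.2.2 E' ∧ pvAdjGood nI.toNat adj' E' ∧
        pvEGood nI.toNat E') := by
  intro k
  induction k with
  | zero =>
    intro j p sz cc adj E hd ha he
    exact Or.inr ⟨(p, sz, cc), adj, E, rfl, rfl, hd, ha, he⟩
  | succ k ih =>
    intro j p sz cc adj E hd ha he
    rw [pvALoop, pvBLoop]
    by_cases hl3 :
        ((PySem.Str.split? (PySem.List.pyGetD lines (idx + (j : Int)) "") " ").getD []).length ≠ 3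
    · simp only [if_pos hl3]
      refine Or.inl ⟨?_, ?_⟩ <;> trivial
    · simp only [if_neg hl3]
      cases hu : PySem.Int.ofStr?
          (((PySem.Str.split? (PySem.List.pyGetD lines (idx + (j : Int)) "") " ").getD []).getD 0 "")
        with
      | none => refine Or.inl ⟨?_, ?_⟩ <;> simp
      | some u =>
      cases hv : PySem.Int.ofStr?
          (((PySem.Str.split? (PySem.List.pyGetD lines (idx + (j : Int)) "") " ").getD []).getD 1 "")
        with
      | none => refine Or.inl ⟨?_, ?_⟩ <;> simp
      | some v =>
      cases hw : PySem.Int.ofStr?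
          (((PySem.Str.split? (PySem.List.pyGetD lines (idx + (j : Int)) "") " ").getD []).getD 2 "")
        with
      | none => refine Or.inl ⟨?_, ?_⟩ <;> simp
      | some w =>
      by_cases hbounds : ¬ (1 ≤ u ∧ u ≤ nI ∧ 1 ≤ v ∧ v ≤ nI)
      · simp only [if_pos hbounds]
        refine Or.inl ⟨?_, ?_⟩ <;> trivial
      · simp only [if_neg hbounds]
        by_cases hwb : ¬ (-1000000000 ≤ w ∧ w ≤ 1000000000)
        · simp only [if_pos hwb]
          refine Or.inl ⟨?_, ?_⟩ <;> trivial
        · simp only [if_neg hwb]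
          rw [not_not] at hbounds
          by_cases huv : u ≠ v
          · simp only [if_pos huv]
            have hun : (u - 1).toNat < nI.toNat := by omega
            have hvn : (v - 1).toNat < nI.toNat := by omega
            have hne : (u - 1).toNat ≠ (v - 1).toNat := by omega
            have hd' := pvUnion_spec hd hun hvn hne
            have ha' := pvAdjGood_add ha hun hvn hne
            have he' : pvEGood nI.toNat (E ++ [((u - 1).toNat, (v - 1).toNat)]) := by
              intro e heMem
              rcases List.mem_append.mp heMem with h1 | h1
              · exact he e h1
              · simp only [List.mem_singleton] at h1
                subst h1
                exact ⟨hun, hvn, hne⟩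
            exact ih (j + 1) _ _ _ _ _ hd' ha' he'
          · simp only [if_neg huv]
            exact ih (j + 1) _ _ _ _ _ hd ha he

theorem pvRange_getD {n a : Nat} (h : a < n) : (List.range n).getD a 0 = a := by
  simp [List.getD, h]

theorem pvReplicate_getD {α : Type} {n a : Nat} {x d : α} (h : a < n) :
    (List.replicate n x).getD a d = x := by
  simp [List.getD, h]

theorem pvReach_nil {x y : Nat} : pvReach [] x y ↔ x = y := by
  constructor
  · intro h
    induction h with
    | refl => rfl
    | tail _ hadj ih => rcases hadj with h1 | h1 <;> simp at h1
  · rintro rfl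
    exact Relation.ReflTransGen.refl

theorem pvRootOf_range {n x r : Nat} (hx : x < n) :
    pvRootOf (List.range n) x r ↔ r = x := by
  constructor
  · intro h
    cases h with
    | self => rfl
    | step _ _ h2 => exact absurd (pvRange_getD hx) h2
  · rintro rfl
    exact pvRootOf.self _ (pvRange_getD hx)

theorem pvInitDSU (n' : Nat) :
    pvDSUGood n' (List.range n') (List.replicate n' 1) (n' : Int) [] := by
  refine ⟨⟨List.length_range, List.length_replicate, ?_, ?_, ?_⟩, ?_, ?_⟩
  · intro a ha; rw [pvRange_getD ha]; exact ha
  · intro a ha; rw [pvReplicate_getD ha]; omega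
  · intro a ha hne; exact absurd (pvRange_getD ha) hne
  · have : (Finset.range n').filter (fun a => (List.range n').getD a 0 = a) =
        Finset.range n' := by
      apply Finset.filter_true_of_mem
      intro a ha
      exact pvRange_getD (Finset.mem_range.mp ha)
    rw [this, Finset.card_range]
  · intro x y hx hy
    rw [pvReach_nil]
    constructor
    · rintro ⟨r, h1, h2⟩
      rw [← (pvRootOf_range hx).mp h1, ← (pvRootOf_range hy).mp h2]
    · rintro rfl
      exact ⟨_, (pvRootOf_range hx).mpr rfl, (pvRootOf_range hx).mpr rfl⟩

theorem pvInitAdj (n' : Nat) : pvAdjGood n' (List.replicate n' ([] : List Nat)) [] := by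
  refine ⟨List.length_replicate, ?_⟩
  intro x y hx
  rw [pvReplicate_getD hx]
  simp [pvAdjacent]

theorem pvVis0_getD (n' x : Nat) (hn : 0 < n') :
    (((List.replicate n' false).set 0 true).getD x false = true) ↔ x = 0 := by
  constructor
  · intro h
    by_contra hx
    rw [pvGetD_set_ne _ _ _ _ _ hx] at h
    by_cases hxn : x < n'
    · rw [pvReplicate_getD hxn] at h; exact Bool.false_ne_true h
    · rw [List.getD_eq_default _ _ (by simp; omega)] at h; exact Bool.false_ne_true h
  · rintro rfl
    exact pvGetD_set_self _ _ _ _ (by simp [hn])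

theorem pvVis0_count (n' : Nat) (hn : 0 < n') :
    ((List.replicate n' false).set 0 true).countP (fun b => b = true) = 1 := by
  have h1 := pvCountP_set_true (List.replicate n' false) 0 (by simp [hn])
    (pvReplicate_getD hn)
  have h2 : (List.replicate n' false).countP (fun b => b = true) = 0 := by
    rw [List.countP_eq_zero]
    intro b hb
    rw [List.eq_of_mem_replicate hb]
    simp
  omega

theorem pvCountP_len (l : List Bool) :
    (l.countP (fun b => b = true) = l.length ↔ ∀ b ∈ l, b = true) := by
  induction l with
  | nil => simp
  | cons a l ih =>
    cases a with
    | true => simp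
    | false =>
      have hle := List.countP_le_length (p := fun b => (b : Bool)) (l := l)
      simp
      omega

theorem pvCount_iff {n' : Nat} {adj : List (List Nat)} {E : List (Nat × Nat)}
    (hadj : pvAdjGood n' adj E) {vis : List Bool} (hlen : vis.length = n')
    (hzero : vis.getD 0 false = true)
    (hsound : ∀ x, vis.getD x false = true → pvReach E 0 x)
    (hclosed : ∀ x, vis.getD x false = true → ∀ y ∈ adj.getD x [], vis.getD y false = true) :
    (vis.countP (fun b => b = true) = n' ↔ ∀ x, x < n' → pvReach E 0 x) := by
  constructor
  · intro hc x hx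
    apply hsound
    have hall : ∀ b ∈ vis, b = true := (pvCountP_len vis).mp (by rw [hc, hlen])
    have hxl : x < vis.length := by omega
    rw [List.getD_eq_getElem vis false hxl]
    exact hall _ (List.getElem_mem hxl)
  · intro h
    rw [← hlen]
    rw [pvCountP_len vis]
    intro b hb
    obtain ⟨i, hi, rfl⟩ := List.mem_iff_getElem.mp hb
    have : vis.getD i false = true := by
      apply pvDfsClosed_reach hadj hlen hzero hclosed
      exact h i (by omega)
    rwa [List.getD_eq_getElem vis false hi] at this

theorem pvMain (lines : List String) (idx : Int) :
    parse_one_case lines idx = parse_one_case_alt lines idx := by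
  unfold parse_one_case parse_one_case_alt
  by_cases h1 : (lines.length : Int) ≤ idx
  · simp only [if_pos h1]
  · simp only [if_neg h1]
    by_cases h2 : ((PySem.Str.split? (PySem.List.pyGetD lines idx "") " ").getD []).length ≠ 2
    · simp only [if_pos h2]
    · simp only [if_neg h2]
      cases hn : PySem.Int.ofStr?
          (((PySem.Str.split? (PySem.List.pyGetD lines idx "") " ").getD []).getD 0 "") with
      | none => rfl
      | some n =>
      cases hm : PySem.Int.ofStr?
          (((PySem.Str.split? (PySem.List.pyGetD lines idx "") " ").getD []).getD 1 "") with
      | none => rfl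
      | some m =>
      by_cases h3 : ¬ (2 ≤ n ∧ n ≤ 200000)
      · simp only [if_pos h3]
      · simp only [if_neg h3]
        by_cases h4 : ¬ (n - 1 ≤ m ∧ m ≤ 200000)
        · simp only [if_pos h4]
        · simp only [if_neg h4]
          by_cases h5 : (lines.length : Int) ≤ idx + m
          · simp only [if_pos h5]
          · simp only [if_neg h5]
            rw [not_not] at h3
            have hn0 : 0 < n.toNat := by omega
            have hccCast : n = ((n.toNat : Nat) : Int) := by omega
            have hd0 : pvDSUGood n.toNat (List.range n.toNat) (List.replicate n.toNat 1) n [] := by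
              rw [hccCast]
              exact pvInitDSU n.toNat
            rcases pvLoop_rel lines idx n m.toNat 1 (List.range n.toNat)
                (List.replicate n.toNat 1) n (List.replicate n.toNat []) [] hd0
                (pvInitAdj n.toNat) (by intro e he; simp at he) with
              ⟨hA, hB⟩ | ⟨st', adj', E', hA, hB, hd', ha', he'⟩
            · simp only [hA, hB]
            · simp only [hA, hB]
              -- the DFS starting state satisfies the invariant
              have hinv : pvDFSInv n.toNat adj' E'
                  ((List.replicate n.toNat false).set 0 true) 1 [0] := by
                refine ⟨by simp, ?_, ?_, ?_, ?_, ?_⟩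
                · intro x hx
                  simp only [List.mem_singleton] at hx
                  subst hx
                  exact (pvVis0_getD n.toNat 0 hn0).mpr rfl
                · exact (pvVis0_getD n.toNat 0 hn0).mpr rfl
                · intro x hx
                  rw [(pvVis0_getD n.toNat x hn0).mp hx]
                  exact Relation.ReflTransGen.refl
                · intro x hx
                  exact Or.inl (by simp [(pvVis0_getD n.toNat x hn0).mp hx])
                · rw [pvVis0_count n.toNat hn0]
                  simp
              have spec := pvDfsLoop_spec ha' he'
                ((List.replicate n.toNat false).set 0 true) 1 [0] hinv
              obtain ⟨hlen', hcnt', hzero', hsound', hclosed'⟩ := spec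
              have hcci := pvCCOne hd' hn0
              have hcnt_iff := pvCount_iff ha' hlen' hzero' hsound' hclosed'
              -- st'.2.2 = 1 ↔ the DFS count equals n
              have hiff : (st'.2.2 = 1) ↔
                  ((pvDfsLoop adj' ((List.replicate n.toNat false).set 0 true) 1 [0]).2 = n) := by
                rw [hcci, hcnt', ← hcnt_iff]
                omega
              have hcc' : ((pvDfsLoop adj' ((List.replicate n.toNat false).set 0 true) 1 [0]).2 ≠ n)
                  ↔ (st'.2.2 ≠ 1) := not_congr hiff.symm
              by_cases hcc : st'.2.2 ≠ 1
              · rw [if_pos hcc, if_pos (hcc'.mpr hcc)]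
              · rw [if_neg hcc, if_neg (fun h => hcc (hcc'.mp h))]

-- ===== VERDICT (by name: the statement is the Claim_ definition above) =====
theorem parse_one_case_spec : Claim_equal_parse_one_case := by
  intro lines idx _ _
  unfold Spec_parse_one_case
  exact pvMain lines idx
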